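-- pv_equiv track=rewrite | github.com/cyphou/TableauToFabric | tableau_export/dax_converter.py | _char_class_to_code_check
-- ===== SOURCE A (Python) =====
-- def _char_class_to_code_check(char_class_body, field_expr):
--     """Convert a regex character class body like ``a-zA-Z0-9`` to a DAX CODE-based check.
--
--     *field_expr* should be a single-character expression like ``MID(field, i, 1)``.
--     Returns a DAX boolean expression using ``||`` and ``&&`` operators (not
--     ``OR()``/``AND()`` functions, which would be mangled by Phase 4 operator
--     conversion), or ``None`` if the class is too complex.
--     """
--     parts = []
--     i = 0
--     while i < len(char_class_body):
--         if i + 2 < len(char_class_body) and char_class_body[i + 1] == '-':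
--             # Range like a-z
--             lo = char_class_body[i]
--             hi = char_class_body[i + 2]
--             parts.append(f'(CODE({field_expr}) >= {ord(lo)} && CODE({field_expr}) <= {ord(hi)})')
--             i += 3
--         else:
--             ch = char_class_body[i]
--             parts.append(f'(CODE({field_expr}) = {ord(ch)})')
--             i += 1
--     if not parts:
--         return None
--     if len(parts) == 1:
--         return parts[0]
--     return '(' + ' || '.join(parts) + ')'
-- ===== SOURCE B (Python) =====
-- def _char_class_to_code_check(char_class_body, field_expr):
--     """State-machine version: consume one character at a time with a pending
--     (lo, dash) state and flush leftovers at the end; no lookahead or index jumps."""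
--     code = f'CODE({field_expr})'
--     parts = []
--     lo = None       # pending first character of a potential range
--     dash = False    # a '-' has been seen after lo
--     for c in char_class_body:
--         if lo is None:
--             lo = c
--         elif not dash:
--             if c == '-':
--                 dash = True
--             else:
--                 parts.append(f'({code} = {ord(lo)})')
--                 lo = c
--         else:
--             parts.append(f'({code} >= {ord(lo)} && {code} <= {ord(c)})')
--             lo, dash = None, False
--     if lo is not None:
--         parts.append(f'({code} = {ord(lo)})')
--         if dash:
--             parts.append(f'({code} = {ord("-")})')
--     if not parts:
--         return None
--     if len(parts) == 1:
--         return parts[0]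
--     return '(' + ' || '.join(parts) + ')'
-- ===== Notes on version B (the rewrite author's own statement) =====
-- stated objective: alternative
-- what changed: B replaces A's index loop (which peeks two characters ahead and advances the index by 1 or 3) with a one-character-at-a-time finite state machine: a fold carrying a pending character and a dash flag, with an end-of-input flush for the leftover state.
import Mathlib
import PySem

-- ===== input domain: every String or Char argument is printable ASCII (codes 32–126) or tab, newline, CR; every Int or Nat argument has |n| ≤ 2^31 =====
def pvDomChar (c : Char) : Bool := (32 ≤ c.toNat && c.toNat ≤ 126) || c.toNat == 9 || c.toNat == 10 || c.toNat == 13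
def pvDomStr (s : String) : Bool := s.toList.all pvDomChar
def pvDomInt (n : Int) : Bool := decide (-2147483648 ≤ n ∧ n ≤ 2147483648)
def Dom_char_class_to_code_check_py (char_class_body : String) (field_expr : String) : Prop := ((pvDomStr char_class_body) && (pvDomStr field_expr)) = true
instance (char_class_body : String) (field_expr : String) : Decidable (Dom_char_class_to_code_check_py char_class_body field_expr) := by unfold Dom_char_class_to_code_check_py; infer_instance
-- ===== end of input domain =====

-- B replaces A's lookahead index loop (stride 1 or 3) by a one-character-at-a-time
-- state machine (pending char + dash flag, flushed at end); objective: alternative.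

-- ===== PORT A =====
-- A's while loop over index i, transcribed as recursion on i with the parts accumulator
def pvDaxLoopA (cs : List Char) (fe : String) (i : Nat) (parts : List String) : List String :=
  if _h : i < cs.length then
    if i + 2 < cs.length ∧ cs.getD (i + 1) ' ' = '-' then
      pvDaxLoopA cs fe (i + 3)
        (parts ++ ["(CODE(" ++ fe ++ ") >= " ++ PySem.Int.toStr ((cs.getD i ' ').toNat : Int)
          ++ " && CODE(" ++ fe ++ ") <= " ++ PySem.Int.toStr ((cs.getD (i + 2) ' ').toNat : Int) ++ ")"])
    else
      pvDaxLoopA cs fe (i + 1)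
        (parts ++ ["(CODE(" ++ fe ++ ") = " ++ PySem.Int.toStr ((cs.getD i ' ').toNat : Int) ++ ")"])
  else parts
termination_by cs.length - i

def char_class_to_code_check_py (char_class_body : String) (field_expr : String) : Option String :=
  let parts := pvDaxLoopA char_class_body.toList field_expr 0 []
  if parts = [] then none
  else if parts.length = 1 then some (parts.getD 0 "")
  else some ("(" ++ PySem.Str.join " || " parts ++ ")")

-- ===== PORT B =====
-- B's f-strings for a single char and for a range (code is the precomputed 'CODE(field)')
def pvFsmSingle (code : String) (c : Char) : String :=
  "(" ++ code ++ " = " ++ PySem.Int.toStr (c.toNat : Int) ++ ")"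

def pvFsmRange (code : String) (lo c : Char) : String :=
  "(" ++ code ++ " >= " ++ PySem.Int.toStr (lo.toNat : Int)
    ++ " && " ++ code ++ " <= " ++ PySem.Int.toStr (c.toNat : Int) ++ ")"

-- one step of B's for-loop body: state = (parts, lo, dash)
def pvFsmStep (code : String) (st : List String × Option Char × Bool) (c : Char) :
    List String × Option Char × Bool :=
  match st with
  | (parts, none, dash) => (parts, some c, dash)
  | (parts, some lo, false) =>
      if c = '-' then (parts, some lo, true)
      else (parts ++ [pvFsmSingle code lo], some c, false)
  | (parts, some lo, true) => (parts ++ [pvFsmRange code lo c], none, false)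

-- B's end-of-loop flush of the pending state
def pvFsmFlush (code : String) : List String × Option Char × Bool → List String
  | (parts, none, _) => parts
  | (parts, some lo, false) => parts ++ [pvFsmSingle code lo]
  | (parts, some lo, true) => parts ++ [pvFsmSingle code lo, pvFsmSingle code '-']

def char_class_to_code_check_py_alt (char_class_body : String) (field_expr : String) : Option String :=
  let code := "CODE(" ++ field_expr ++ ")"
  let parts := pvFsmFlush code (char_class_body.toList.foldl (pvFsmStep code) ([], none, false))
  match parts with
  | [] => none
  | [p] => some p
  | _ => some ("(" ++ PySem.Str.join " || " parts ++ ")")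

-- ===== PRECONDITION & SPEC =====
def Spec_char_class_to_code_check_py (char_class_body : String) (field_expr : String) (out : Option String) : Prop := out = char_class_to_code_check_py_alt char_class_body field_expr
instance (char_class_body : String) (field_expr : String) (out : Option String) : Decidable (Spec_char_class_to_code_check_py char_class_body field_expr out) := by unfold Spec_char_class_to_code_check_py; infer_instance

-- ===== CLAIM (what is proved, stated in full; the proofs are below) =====
def Claim_equal_char_class_to_code_check_py : Prop := ∀ (char_class_body : String) (field_expr : String), Dom_char_class_to_code_check_py char_class_body field_expr → Spec_char_class_to_code_check_py char_class_body field_expr (char_class_to_code_check_py char_class_body field_expr)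

-- ===== LEMMAS AND PROOFS =====

-- proof-side token decomposition: the greedy range-or-single tokens of the class body
def pvDaxTokens : List Char → List (Char × Option Char)
  | [] => []
  | [c] => [(c, none)]
  | [c, d] => (c, none) :: pvDaxTokens [d]
  | c :: d :: e :: rest' =>
    if d = '-' then (c, some e) :: pvDaxTokens rest'
    else (c, none) :: pvDaxTokens (d :: e :: rest')

def pvDaxFmt (code : String) : Char × Option Char → String
  | (c, none) => pvFsmSingle code c
  | (lo, some hi) => pvFsmRange code lo hi

-- A's inline single-char f-string equals the formatted token (code pre-concatenated)
theorem pvFmt_single (fe : String) (c : Char) :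
    "(CODE(" ++ fe ++ ") = " ++ PySem.Int.toStr (c.toNat : Int) ++ ")"
      = pvDaxFmt ("CODE(" ++ fe ++ ")") (c, none) := by
  apply String.toList_inj.mp; simp [pvDaxFmt, pvFsmSingle, String.toList_append]

-- A's inline range f-string equals the formatted token
theorem pvFmt_range (fe : String) (lo hi : Char) :
    "(CODE(" ++ fe ++ ") >= " ++ PySem.Int.toStr (lo.toNat : Int)
      ++ " && CODE(" ++ fe ++ ") <= " ++ PySem.Int.toStr (hi.toNat : Int) ++ ")"
      = pvDaxFmt ("CODE(" ++ fe ++ ")") (lo, some hi) := by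
  apply String.toList_inj.mp; simp [pvDaxFmt, pvFsmRange, String.toList_append]

-- loop invariant for A: the while loop from index i produces the formatted tokens of the suffix
theorem pvLoop_eq_tokens (cs : List Char) (fe : String) (i : Nat) (parts : List String) :
    pvDaxLoopA cs fe i parts = parts ++ (pvDaxTokens (cs.drop i)).map (pvDaxFmt ("CODE(" ++ fe ++ ")")) := by
  fun_induction pvDaxLoopA cs fe i parts with
  | case1 i parts h hr ih =>
      obtain ⟨h2, hdash⟩ := hr
      have h1 : i + 1 < cs.length := by omega
      have hd : cs.drop i = cs[i] :: cs[i+1] :: cs[i+2] :: cs.drop (i+3) := by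
        rw [List.drop_eq_getElem_cons (by omega), List.drop_eq_getElem_cons (by omega),
            List.drop_eq_getElem_cons (by omega)]
      rw [ih, hd]
      rw [List.getD_eq_getElem cs ' ' h1] at hdash
      simp [pvDaxTokens, hdash, pvFmt_range, h, h2]
  | case2 i parts h hr ih =>
      have hd : cs.drop i = cs[i] :: cs.drop (i+1) := List.drop_eq_getElem_cons h
      rw [ih, hd]
      have hsingle : pvDaxTokens (cs[i] :: cs.drop (i+1)) = (cs[i], none) :: pvDaxTokens (cs.drop (i+1)) := by
        rcases he : cs.drop (i+1) with _ | ⟨d, _ | ⟨e, rest⟩⟩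
        · simp [pvDaxTokens]
        · simp [pvDaxTokens]
        · have hlen : i + 2 < cs.length := by
            have := congrArg List.length he
            simp at this; omega
          have hd1 : cs.drop (i+1) = cs[i+1] :: cs.drop (i+2) := List.drop_eq_getElem_cons (by omega)
          have hdeq : d = cs[i+1] := by rw [he] at hd1; exact (List.cons.injEq .. ▸ hd1).1
          have hne : d ≠ '-' := by
            intro hcontra
            exact hr ⟨hlen, by rw [List.getD_eq_getElem cs ' ' (by omega)]; rw [← hdeq]; exact hcontra⟩
          simp [pvDaxTokens, hne]
      rw [hsingle]
      simp [pvFmt_single, h]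
  | case3 i parts h =>
      have : cs.drop i = [] := List.drop_eq_nil_of_le (by omega)
      simp [this, pvDaxTokens]

-- the state machine from a fresh state emits exactly the formatted greedy tokens
theorem pvFsm_eq_tokens (code : String) (cs : List Char) :
    ∀ parts, pvFsmFlush code (cs.foldl (pvFsmStep code) (parts, none, false))
      = parts ++ (pvDaxTokens cs).map (pvDaxFmt code) := by
  fun_induction pvDaxTokens cs with
  | case1 => intro parts; simp [pvFsmFlush]
  | case2 c => intro parts; simp [List.foldl, pvFsmStep, pvFsmFlush, pvDaxTokens, pvDaxFmt]
  | case3 c d =>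
      intro parts
      by_cases hd : d = '-'
      · subst hd
        simp [List.foldl, pvFsmStep, pvFsmFlush, pvDaxTokens, pvDaxFmt]
      · simp [List.foldl, pvFsmStep, pvFsmFlush, pvDaxTokens, pvDaxFmt, hd]
  | case4 c e rest ih =>
      intro parts
      simp [List.foldl, pvFsmStep, pvDaxFmt, ih]
  | case5 c d e rest hd ih =>
      intro parts
      have h2 := ih (parts ++ [pvFsmSingle code c])
      simp only [List.foldl, pvFsmStep, if_neg hd] at h2 ⊢
      rw [h2]
      simp [pvDaxFmt]

-- ===== VERDICT (by name: the statement is the Claim_ definition above) =====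
theorem char_class_to_code_check_py_spec : Claim_equal_char_class_to_code_check_py := by
  intro body fe _
  unfold Spec_char_class_to_code_check_py
  simp only [char_class_to_code_check_py, char_class_to_code_check_py_alt]
  rw [pvLoop_eq_tokens, pvFsm_eq_tokens, List.nil_append, List.nil_append]
  rcases hl : pvDaxTokens body.toList with _ | ⟨t, _ | ⟨u, rest⟩⟩ <;> simp [hl]
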